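-- pv_equiv track=rewrite | github.com/S33J33J33/isInTriangle.py | main_3D.py | isInTriangle2
-- ===== SOURCE A (Python) =====
-- def product2(x1 ,y1 ,z1 ,x2 ,y2 ,z2 ,x3 ,y3 ,z3):
--     return (y2 - y1) * (z3 - z1) - (y3 - y1) * (z2 - z1) - (x2 - x1) * (z3 - z1) + (x3 - x1) * (z2 - z1) + (x2 - x1) * (
--             y3 - y1) - (x3 - x1) * (y2 - y1)
--
-- def isInTriangle2(x_t_1 ,y_t_1 ,z_t_1 ,x_t_2 ,y_t_2 ,z_t_2 ,x_t_3 ,y_t_3 ,z_t_3 ,x_o ,y_o ,z_o):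
--   if product2(x_t_1 ,y_t_1 ,z_t_1 ,x_t_2 ,y_t_2 ,z_t_2 ,x_t_3 ,y_t_3 ,z_t_3) < 0:
--       return isInTriangle2(x_t_1 ,y_t_1 ,z_t_1 ,x_t_3 ,y_t_3 ,z_t_3 ,x_t_2 ,y_t_2 ,z_t_2 ,x_o ,y_o ,z_o)
--   if product2(x_t_1 ,y_t_1 ,z_t_1 ,x_t_2 ,y_t_2 ,z_t_2 ,x_o ,y_o ,z_o) > 0 and product2(x_t_2 ,y_t_2 ,z_t_2 ,x_t_3 ,
--                                                                                         y_t_3 ,z_t_3 ,x_o ,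
--                                                                                         y_o ,z_o) > 0 and product2(
--       x_t_3 ,y_t_3 ,z_t_3 ,x_t_1 ,y_t_1 ,z_t_1 ,x_o ,y_o ,z_o) > 0:
--       return True
--   return False
-- ===== SOURCE B (Python) =====
-- def product2(x1 ,y1 ,z1 ,x2 ,y2 ,z2 ,x3 ,y3 ,z3):
--     return (y2 - y1) * (z3 - z1) - (y3 - y1) * (z2 - z1) - (x2 - x1) * (z3 - z1) + (x3 - x1) * (z2 - z1) + (x2 - x1) * (
--             y3 - y1) - (x3 - x1) * (y2 - y1)
--
-- def isInTriangle2(x_t_1 ,y_t_1 ,z_t_1 ,x_t_2 ,y_t_2 ,z_t_2 ,x_t_3 ,y_t_3 ,z_t_3 ,x_o ,y_o ,z_o):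
--     # Compute the three edge tests once in the ORIGINAL vertex order and compare
--     # them against the sign demanded by the triangle's orientation: product2 is
--     # antisymmetric in its three points, so A's vertex-swapped re-test is exactly
--     # "all three products strictly negative".
--     want = -1 if product2(x_t_1, y_t_1, z_t_1, x_t_2, y_t_2, z_t_2, x_t_3, y_t_3, z_t_3) < 0 else 1
--     edges = (product2(x_t_1, y_t_1, z_t_1, x_t_2, y_t_2, z_t_2, x_o, y_o, z_o),
--              product2(x_t_2, y_t_2, z_t_2, x_t_3, y_t_3, z_t_3, x_o, y_o, z_o),
--              product2(x_t_3, y_t_3, z_t_3, x_t_1, y_t_1, z_t_1, x_o, y_o, z_o))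
--     return all(g * want > 0 for g in edges)
-- ===== Notes on version B (the rewrite author's own statement) =====
-- stated objective: alternative
-- what changed: Replaces A's self-recursion with swapped vertices by a non-branching uniform check: the three edge products are computed once in the original vertex order and all compared against a sign derived from the triangle orientation, using antisymmetry of product2 instead of re-calling it with permuted arguments.
import Mathlib
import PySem

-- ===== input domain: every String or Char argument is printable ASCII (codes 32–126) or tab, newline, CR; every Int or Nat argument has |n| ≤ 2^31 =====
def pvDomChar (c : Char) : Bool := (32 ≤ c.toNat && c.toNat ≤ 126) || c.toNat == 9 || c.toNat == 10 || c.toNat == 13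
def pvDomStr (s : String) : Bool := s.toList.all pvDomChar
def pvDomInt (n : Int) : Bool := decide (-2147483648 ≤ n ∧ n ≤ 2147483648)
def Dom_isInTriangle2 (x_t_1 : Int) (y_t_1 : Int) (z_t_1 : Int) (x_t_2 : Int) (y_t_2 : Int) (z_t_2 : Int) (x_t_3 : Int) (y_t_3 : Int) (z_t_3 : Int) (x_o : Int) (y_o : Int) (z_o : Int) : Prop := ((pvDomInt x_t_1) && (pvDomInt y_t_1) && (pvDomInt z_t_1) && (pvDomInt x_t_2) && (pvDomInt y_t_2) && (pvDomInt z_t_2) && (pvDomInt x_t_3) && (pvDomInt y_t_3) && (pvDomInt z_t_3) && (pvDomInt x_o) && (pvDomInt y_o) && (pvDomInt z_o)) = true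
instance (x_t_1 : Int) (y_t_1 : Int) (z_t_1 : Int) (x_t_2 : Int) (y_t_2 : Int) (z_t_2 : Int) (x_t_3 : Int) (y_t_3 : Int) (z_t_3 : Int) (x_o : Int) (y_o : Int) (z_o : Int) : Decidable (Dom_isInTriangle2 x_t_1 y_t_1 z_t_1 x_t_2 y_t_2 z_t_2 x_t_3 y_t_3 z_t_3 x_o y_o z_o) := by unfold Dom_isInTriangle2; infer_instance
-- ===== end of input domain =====

-- B replaces A's self-recursion with swapped vertices by a single uniform pass: the three edge products computed once in original order, all compared against a sign taken from the orientation (correct by antisymmetry of product2); objective: alternative.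


-- ===== PORT A =====
def product2 (x1 y1 z1 x2 y2 z2 x3 y3 z3 : Int) : Int :=
  (y2 - y1) * (z3 - z1) - (y3 - y1) * (z2 - z1) - (x2 - x1) * (z3 - z1) + (x3 - x1) * (z2 - z1) + (x2 - x1) * (y3 - y1) - (x3 - x1) * (y2 - y1)

-- A's recursion, made total with a fuel counter (the recursion depth is at most 1:
-- swapping vertices 2 and 3 negates product2, so the guard of the self-call fails on
-- the recursive call; fuel 2 therefore never runs out and the 0-case is unreachable).
def isInTriangle2Go : Nat → Int → Int → Int → Int → Int → Int → Int → Int → Int → Int → Int → Int → Bool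
  | 0, _, _, _, _, _, _, _, _, _, _, _, _ => false
  | Nat.succ fuel, x_t_1, y_t_1, z_t_1, x_t_2, y_t_2, z_t_2, x_t_3, y_t_3, z_t_3, x_o, y_o, z_o =>
    if product2 x_t_1 y_t_1 z_t_1 x_t_2 y_t_2 z_t_2 x_t_3 y_t_3 z_t_3 < 0 then
      isInTriangle2Go fuel x_t_1 y_t_1 z_t_1 x_t_3 y_t_3 z_t_3 x_t_2 y_t_2 z_t_2 x_o y_o z_o
    else if product2 x_t_1 y_t_1 z_t_1 x_t_2 y_t_2 z_t_2 x_o y_o z_o > 0 ∧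
            product2 x_t_2 y_t_2 z_t_2 x_t_3 y_t_3 z_t_3 x_o y_o z_o > 0 ∧
            product2 x_t_3 y_t_3 z_t_3 x_t_1 y_t_1 z_t_1 x_o y_o z_o > 0 then
      true
    else
      false

def isInTriangle2 (x_t_1 : Int) (y_t_1 : Int) (z_t_1 : Int) (x_t_2 : Int) (y_t_2 : Int) (z_t_2 : Int) (x_t_3 : Int) (y_t_3 : Int) (z_t_3 : Int) (x_o : Int) (y_o : Int) (z_o : Int) : Bool :=
  isInTriangle2Go 2 x_t_1 y_t_1 z_t_1 x_t_2 y_t_2 z_t_2 x_t_3 y_t_3 z_t_3 x_o y_o z_o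

-- ===== PORT B =====
def isInTriangle2_alt (x_t_1 : Int) (y_t_1 : Int) (z_t_1 : Int) (x_t_2 : Int) (y_t_2 : Int) (z_t_2 : Int) (x_t_3 : Int) (y_t_3 : Int) (z_t_3 : Int) (x_o : Int) (y_o : Int) (z_o : Int) : Bool :=
  let want : Int := if product2 x_t_1 y_t_1 z_t_1 x_t_2 y_t_2 z_t_2 x_t_3 y_t_3 z_t_3 < 0 then -1 else 1
  let edges : List Int := [product2 x_t_1 y_t_1 z_t_1 x_t_2 y_t_2 z_t_2 x_o y_o z_o,
                           product2 x_t_2 y_t_2 z_t_2 x_t_3 y_t_3 z_t_3 x_o y_o z_o,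
                           product2 x_t_3 y_t_3 z_t_3 x_t_1 y_t_1 z_t_1 x_o y_o z_o]
  edges.all (fun g => g * want > 0)

-- ===== PRECONDITION & SPEC =====
def Spec_isInTriangle2 (x_t_1 : Int) (y_t_1 : Int) (z_t_1 : Int) (x_t_2 : Int) (y_t_2 : Int) (z_t_2 : Int) (x_t_3 : Int) (y_t_3 : Int) (z_t_3 : Int) (x_o : Int) (y_o : Int) (z_o : Int) (out : Bool) : Prop := out = isInTriangle2_alt x_t_1 y_t_1 z_t_1 x_t_2 y_t_2 z_t_2 x_t_3 y_t_3 z_t_3 x_o y_o z_o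
instance (x_t_1 : Int) (y_t_1 : Int) (z_t_1 : Int) (x_t_2 : Int) (y_t_2 : Int) (z_t_2 : Int) (x_t_3 : Int) (y_t_3 : Int) (z_t_3 : Int) (x_o : Int) (y_o : Int) (z_o : Int) (out : Bool) : Decidable (Spec_isInTriangle2 x_t_1 y_t_1 z_t_1 x_t_2 y_t_2 z_t_2 x_t_3 y_t_3 z_t_3 x_o y_o z_o out) := by unfold Spec_isInTriangle2; infer_instance

-- ===== CLAIM (what is proved, stated in full; the proofs are below) =====
def Claim_equal_isInTriangle2 : Prop := ∀ (x_t_1 : Int) (y_t_1 : Int) (z_t_1 : Int) (x_t_2 : Int) (y_t_2 : Int) (z_t_2 : Int) (x_t_3 : Int) (y_t_3 : Int) (z_t_3 : Int) (x_o : Int) (y_o : Int) (z_o : Int), Dom_isInTriangle2 x_t_1 y_t_1 z_t_1 x_t_2 y_t_2 z_t_2 x_t_3 y_t_3 z_t_3 x_o y_o z_o → Spec_isInTriangle2 x_t_1 y_t_1 z_t_1 x_t_2 y_t_2 z_t_2 x_t_3 y_t_3 z_t_3 x_o y_o z_o (isInTriangle2 x_t_1 y_t_1 z_t_1 x_t_2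 y_t_2 z_t_2 x_t_3 y_t_3 z_t_3 x_o y_o z_o)

-- ===== LEMMAS AND PROOFS =====
-- product2 is antisymmetric under swapping two of its three points.
theorem product2_swap23 (x1 y1 z1 x2 y2 z2 x3 y3 z3 : Int) :
    product2 x1 y1 z1 x3 y3 z3 x2 y2 z2 = -product2 x1 y1 z1 x2 y2 z2 x3 y3 z3 := by
  unfold product2; ring

theorem product2_swap12 (x1 y1 z1 x2 y2 z2 x3 y3 z3 : Int) :
    product2 x2 y2 z2 x1 y1 z1 x3 y3 z3 = -product2 x1 y1 z1 x2 y2 z2 x3 y3 z3 := by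
  unfold product2; ring

-- ===== VERDICT (by name: the statement is the Claim_ definition above) =====
theorem isInTriangle2_spec : Claim_equal_isInTriangle2 := by
  intro x1 y1 z1 x2 y2 z2 x3 y3 z3 xo yo zo _
  unfold Spec_isInTriangle2 isInTriangle2 isInTriangle2_alt isInTriangle2Go
  simp only [List.all_cons, List.all_nil, Bool.and_true]
  by_cases h : product2 x1 y1 z1 x2 y2 z2 x3 y3 z3 < 0
  · rw [if_pos h, if_pos h]
    unfold isInTriangle2Go
    rw [if_neg (by rw [product2_swap23]; omega)]
    -- express A's swapped-vertex products as negations of B's original-order products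
    rw [product2_swap12 x3 y3 z3 x1 y1 z1 xo yo zo,
        product2_swap12 x2 y2 z2 x3 y3 z3 xo yo zo,
        product2_swap12 x1 y1 z1 x2 y2 z2 xo yo zo]
    split_ifs with h1 <;>
      · symm
        simp only [Bool.and_eq_true, decide_eq_true_eq, Bool.and_eq_false_iff,
          decide_eq_false_iff_not]
        omega
  · rw [if_neg h, if_neg h]
    split_ifs with h1 <;>
      · symm
        simp only [Bool.and_eq_true, decide_eq_true_eq, Bool.and_eq_false_iff,
          decide_eq_false_iff_not]
        omega
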